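-- pv_equiv track=rewrite | github.com/adrian-popa/artificial-intelligence | lab1/src/task-c/problems/cryptarithmetic_game.py | __map_word
-- ===== SOURCE A (Python) =====
-- def __map_word(letters, word):
--     reverse = word[::-1]
--     value = 0
--     hexa = 1
--
--     for letter in reverse:
--         value += letters[letter] * hexa
--         hexa *= 16
--
--     return value
-- ===== SOURCE B (Python) =====
-- def __map_word(letters, word):
--     # Horner's method: forward pass, value = value*16 + digit
--     value = 0
--     for letter in word:
--         value = value * 16 + letters[letter]
--     return value
-- ===== Notes on version B (the rewrite author's own statement) =====
-- stated objective: idiomatic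
-- what changed: Replaces the reversed-string walk with explicit power-of-16 weights by a forward Horner recurrence value = value*16 + letters[letter], dropping the reverse and hexa variables.
import Mathlib
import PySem

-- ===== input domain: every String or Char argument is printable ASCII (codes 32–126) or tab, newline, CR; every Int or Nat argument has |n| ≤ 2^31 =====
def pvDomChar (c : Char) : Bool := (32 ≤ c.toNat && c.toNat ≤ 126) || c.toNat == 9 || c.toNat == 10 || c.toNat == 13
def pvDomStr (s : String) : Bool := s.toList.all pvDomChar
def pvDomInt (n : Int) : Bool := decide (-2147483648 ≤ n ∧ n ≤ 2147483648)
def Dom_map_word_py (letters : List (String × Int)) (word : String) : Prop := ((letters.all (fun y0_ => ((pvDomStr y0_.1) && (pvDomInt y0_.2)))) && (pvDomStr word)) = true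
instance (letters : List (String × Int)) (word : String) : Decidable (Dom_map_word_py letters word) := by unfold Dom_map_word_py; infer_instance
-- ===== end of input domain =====

-- B replaces the reversed walk with explicit 16^i weights by a forward Horner recurrence (idiomatic).
-- letters[letter]: dict lookup, first match on the single-char key; Pre_ excludes the KeyError case,
-- so the 0 default of the lookup helper is never reached on admitted inputs.
def pvLookup (letters : List (String × Int)) (c : Char) : Int :=
  ((letters.find? (fun p => p.1 == String.mk [c])).map (·.2)).getD 0

-- ===== PORT A =====
-- word[::-1] ported as word.toList.reverse (exact for any string); the loop keeps (value, hexa).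
def map_word_py (letters : List (String × Int)) (word : String) : Int :=
  (word.toList.reverse.foldl
    (fun (s : Int × Int) letter => (s.1 + pvLookup letters letter * s.2, s.2 * 16))
    (0, 1)).1

-- ===== PORT B =====
def map_word_py_alt (letters : List (String × Int)) (word : String) : Int :=
  word.toList.foldl (fun value letter => value * 16 + pvLookup letters letter) 0

-- ===== PRECONDITION & SPEC =====
-- Pre_ excludes exactly the inputs where a letter of word is not a key of letters: there A raises KeyError.
def Pre_map_word_py (letters : List (String × Int)) (word : String) : Prop :=
  (word.toList.all (fun c => (letters.find? (fun p => p.1 == String.mk [c])).isSome)) = true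
instance (letters : List (String × Int)) (word : String) : Decidable (Pre_map_word_py letters word) := by unfold Pre_map_word_py; infer_instance

def pvWitness_map_word_py : (List (String × Int)) × String := ([("A", 10), ("1", 1)], "A1A")

def Spec_map_word_py (letters : List (String × Int)) (word : String) (out : Int) : Prop := out = map_word_py_alt letters word
instance (letters : List (String × Int)) (word : String) (out : Int) : Decidable (Spec_map_word_py letters word out) := by unfold Spec_map_word_py; infer_instance

-- ===== CLAIM (what is proved, stated in full; the proofs are below) =====
def Claim_equal_map_word_py : Prop := ∀ (letters : List (String × Int)) (word : String), Dom_map_word_py letters word → Pre_map_word_py letters word → Spec_map_word_py letters word (map_word_py letters word)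

-- ===== LEMMAS AND PROOFS =====

-- Horner fold shifted by an initial accumulator.
theorem horner_shift (letters : List (String × Int)) (l : List Char) (v : Int) :
    l.foldl (fun value letter => value * 16 + pvLookup letters letter) v
      = v * 16 ^ l.length + l.foldl (fun value letter => value * 16 + pvLookup letters letter) 0 := by
  induction l generalizing v with
  | nil => simp
  | cons c t ih =>
    simp only [List.foldl_cons, List.length_cons]
    rw [ih (v * 16 + pvLookup letters c), ih (0 * 16 + pvLookup letters c)]
    ring

-- A's pair fold over the reversed word computes (Horner value, 16^length).
theorem rev_fold_eq (letters : List (String × Int)) (l : List Char) :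
    l.reverse.foldl
      (fun (s : Int × Int) letter => (s.1 + pvLookup letters letter * s.2, s.2 * 16)) (0, 1)
      = (l.foldl (fun value letter => value * 16 + pvLookup letters letter) 0,
         16 ^ l.length) := by
  induction l with
  | nil => simp
  | cons c t ih =>
    simp only [List.reverse_cons, List.foldl_append, ih, List.foldl_cons, List.length_cons]
    rw [horner_shift letters t (0 * 16 + pvLookup letters c)]
    apply Prod.ext <;> simp <;> ring

-- ===== VERDICT (by name: the statement is the Claim_ definition above) =====
theorem map_word_py_spec : Claim_equal_map_word_py := by
  intro letters word _ _
  unfold Spec_map_word_py map_word_py map_word_py_alt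
  rw [rev_fold_eq]
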